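-- pv_equiv track=rewrite | github.com/pypi-data/pypi-mirror-381 | packages/mwe-query/mwe_query-0.2.0a2.tar.gz/mwe_query-0.2.0a2/mwe_query/mkpivothtmls.py | expandcomponents
-- ===== SOURCE A (Python) =====
-- from typing import Dict, List, Optional, Tuple
--
-- def expandcomponents(components: List[str]) -> List[List[str]]:
--     allresults = []
--     if components == []:
--         return [[]]
--     componentshead = components[0]
--     componentstail = components[1:]
--     componentstailexpansions = expandcomponents(componentstail)
--     componentsheadalternatives = componentshead.split('|')
--     for componentsheadalternative in componentsheadalternatives:
--         newresults = [[componentsheadalternative] +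
--                       componentstailexpansion for componentstailexpansion in componentstailexpansions]
--         allresults += newresults
--     return allresults
-- ===== SOURCE B (Python) =====
-- def expandcomponents(components):
--     result = [[]]
--     for component in components:
--         alts = component.split('|')
--         result = [prefix + [alt] for prefix in result for alt in alts]
--     return result
-- ===== Notes on version B (the rewrite author's own statement) =====
-- stated objective: simpler
-- what changed: Replaced the recursion on the tail (with per-alternative list concatenation into an accumulator) by an iterative left-to-right fold that rebuilds the product list with one comprehension per component.
import Mathlib
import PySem

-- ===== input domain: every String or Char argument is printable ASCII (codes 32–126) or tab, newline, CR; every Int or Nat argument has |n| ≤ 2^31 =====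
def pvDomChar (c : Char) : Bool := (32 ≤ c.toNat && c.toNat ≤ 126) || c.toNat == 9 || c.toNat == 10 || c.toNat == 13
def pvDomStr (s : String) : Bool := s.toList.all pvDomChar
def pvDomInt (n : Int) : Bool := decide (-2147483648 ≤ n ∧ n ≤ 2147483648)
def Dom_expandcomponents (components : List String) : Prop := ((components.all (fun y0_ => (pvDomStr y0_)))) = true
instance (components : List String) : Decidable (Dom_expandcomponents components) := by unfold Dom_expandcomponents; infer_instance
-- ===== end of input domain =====

-- B replaces A's recursion-with-accumulated-appends by an iterative fold over the components (simpler).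


-- ===== PORT A =====
-- shared helper: Python s.split('|') (separator non-empty, so split? always returns some)
def splitPipe (s : String) : List String := (PySem.Str.split? s "|").getD []

def expandcomponents (components : List String) : List (List String) :=
  match components with
  | [] => [[]]
  | componentshead :: componentstail =>
    let componentstailexpansions := expandcomponents componentstail
    let componentsheadalternatives := splitPipe componentshead
    componentsheadalternatives.foldl
      (fun allresults alt =>
        allresults ++ componentstailexpansions.map (fun e => alt :: e)) []

-- ===== PORT B =====
def expandcomponents_alt (components : List String) : List (List String) :=
  components.foldl
    (fun result component =>
      result.flatMap (fun pre => (splitPipe component).map (fun alt => pre ++ [alt])))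
    [[]]

-- ===== PRECONDITION & SPEC =====
def Spec_expandcomponents (components : List String) (out : List (List String)) : Prop := out = expandcomponents_alt components
instance (components : List String) (out : List (List String)) : Decidable (Spec_expandcomponents components out) := by unfold Spec_expandcomponents; infer_instance

-- ===== CLAIM (what is proved, stated in full; the proofs are below) =====
def Claim_equal_expandcomponents : Prop := ∀ (components : List String), Dom_expandcomponents components → Spec_expandcomponents components (expandcomponents components)

-- ===== LEMMAS AND PROOFS =====

-- ===== VERDICT (by name: the statement is the Claim_ definition above) =====
lemma expand_foldl (cs : List String) (acc : List (List String)) :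
    cs.foldl
      (fun result component =>
        result.flatMap (fun pre => (splitPipe component).map (fun alt => pre ++ [alt])))
      acc
    = acc.flatMap (fun p => (expandcomponents cs).map (fun e => p ++ e)) := by
  induction cs generalizing acc with
  | nil => simp [expandcomponents]
  | cons c t ih =>
    simp only [List.foldl_cons, ih, expandcomponents,
      PySem.List.foldl_append_eq_flatMap, List.nil_append]
    simp [List.flatMap_assoc, List.flatMap_map, List.map_flatMap, List.map_map,
      Function.comp_def, List.append_assoc]

theorem expandcomponents_spec : Claim_equal_expandcomponents := by
  intro components _
  unfold Spec_expandcomponents expandcomponents_alt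
  rw [expand_foldl]
  simp
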